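-- pv_equiv track=rewrite | github.com/ajaysinghthakur/resumes_repo | parse_json.py | gen_languages
-- ===== SOURCE A (Python) =====
-- def esc(value):
--     """
--     Return value as a LaTeX-safe string.
--     Escapes bare & so company names like 'Texas A&M' compile correctly.
--     Values already written as LaTeX (\\& etc.) are left untouched.
--     """
--     if value is None:
--         return ""
--     s = str(value).strip()
--     out, prev = [], ""
--     for ch in s:
--         if ch == "&" and prev != "\\":
--             out.append("\\&")
--         else:
--             out.append(ch)
--         prev = ch
--     return "".join(out)
--
-- def gen_languages(entries: list) -> str:
--     """languages[] — language, fluency"""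
--     lines = []
--     for i, lang in enumerate(entries or []):
--         suffix = " \\\\" if i < len(entries) - 1 else ""
--         lines.append(
--             f"     \\textbf{{{esc(lang.get('language',''))}}}{{: {esc(lang.get('fluency',''))}}}{suffix}"
--         )
--     return "\\small{\\item{\n" + "\n".join(lines) + "\n    }}"
-- ===== SOURCE B (Python) =====
-- def esc(value):
--     if value is None:
--         return ""
--     s = str(value).strip()
--     out = []
--     i = 0
--     n = len(s)
--     while i < n:
--         if s.startswith("\\&", i):
--             out.append("\\&")
--             i += 2
--         elif s[i] == "&":
--             out.append("\\&")
--             i += 1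
--         else:
--             out.append(s[i])
--             i += 1
--     return "".join(out)
--
--
-- def gen_languages(entries: list) -> str:
--     body = " \\\\\n".join(
--         f"     \\textbf{{{esc(d.get('language', ''))}}}{{: {esc(d.get('fluency', ''))}}}"
--         for d in (entries or [])
--     )
--     return "\\small{\\item{\n" + body + "\n    }}"
-- ===== Notes on version B (the rewrite author's own statement) =====
-- stated objective: alternative
-- what changed: esc drops A's prev-character state machine for a tokenizer scan that consumes the already-escaped two-char sequence '\&' atomically (advancing by 2) and otherwise handles one char, and gen_languages replaces the enumerate/per-element-suffix bookkeeping by joining plain line bodies with ' \\\\\n'.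
import Mathlib
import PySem

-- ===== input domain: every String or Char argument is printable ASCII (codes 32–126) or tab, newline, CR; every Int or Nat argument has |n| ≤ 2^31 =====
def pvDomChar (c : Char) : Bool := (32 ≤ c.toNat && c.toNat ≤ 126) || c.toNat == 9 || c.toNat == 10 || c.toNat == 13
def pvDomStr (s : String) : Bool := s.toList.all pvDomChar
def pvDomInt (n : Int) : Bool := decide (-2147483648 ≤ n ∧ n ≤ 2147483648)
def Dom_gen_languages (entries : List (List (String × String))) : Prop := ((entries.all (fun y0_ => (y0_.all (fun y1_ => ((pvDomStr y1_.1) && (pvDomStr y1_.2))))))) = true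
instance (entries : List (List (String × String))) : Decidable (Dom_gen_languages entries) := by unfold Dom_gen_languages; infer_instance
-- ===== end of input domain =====

-- B replaces A's prev-carrying state-machine loop in esc by a tokenizer that consumes the
-- already-escaped sequence "\&" atomically (advancing by two chars, no carried state), and A's
-- enumerate-with-suffix line building by joining plain line bodies with " \\\\\n" (alternative, same cost).

-- ===== PORT A =====
-- esc: literal transliteration (value is always a string here; Python's None branch is unreachable)
def escA (value : String) : String :=
  let s := PySem.Str.strip value
  let r := s.toList.foldl
    (fun (st : List String × String) ch =>
      if ch == '&' && st.2 != "\\" then (st.1 ++ ["\\&"], String.ofList [ch])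
      else (st.1 ++ [String.ofList [ch]], String.ofList [ch]))
    ([], "")
  PySem.Str.join "" r.1

def gen_languages (entries : List (List (String × String))) : String :=
  let lines := (PySem.List.enumerate entries 0).foldl
    (fun (lines : List String) p =>
      let suffix := if p.1 < (entries.length : Int) - 1 then " \\\\" else ""
      lines ++ ["     \\textbf{" ++ escA ((PySem.Dict.mk p.2).getD "language" "") ++ "}{: "
                ++ escA ((PySem.Dict.mk p.2).getD "fluency" "") ++ "}" ++ suffix])
    []
  "\\small{\\item{\n" ++ PySem.Str.join "\n" lines ++ "\n    }}"

-- ===== PORT B =====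
-- Source B's while loop over positions, consuming "\&" as a unit (i += 2) and otherwise one char
-- (i += 1), is the recursion on the character list that matches a two-char prefix first.
def escBTok : List Char → List String
  | '\\' :: '&' :: rest => "\\&" :: escBTok rest
  | '&' :: rest => "\\&" :: escBTok rest
  | c :: rest => String.ofList [c] :: escBTok rest
  | [] => []

def escB (value : String) : String :=
  PySem.Str.join "" (escBTok (PySem.Str.strip value).toList)

def lineOfB (d : List (String × String)) : String :=
  "     \\textbf{" ++ escB ((PySem.Dict.mk d).getD "language" "") ++ "}{: "
    ++ escB ((PySem.Dict.mk d).getD "fluency" "") ++ "}"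

def gen_languages_alt (entries : List (List (String × String))) : String :=
  "\\small{\\item{\n" ++ PySem.Str.join " \\\\\n" (entries.map lineOfB) ++ "\n    }}"

-- ===== PRECONDITION & SPEC =====
def Spec_gen_languages (entries : List (List (String × String))) (out : String) : Prop := out = gen_languages_alt entries
instance (entries : List (List (String × String))) (out : String) : Decidable (Spec_gen_languages entries out) := by unfold Spec_gen_languages; infer_instance

-- ===== CLAIM (what is proved, stated in full; the proofs are below) =====
def Claim_equal_gen_languages : Prop := ∀ (entries : List (List (String × String))), Dom_gen_languages entries → Spec_gen_languages entries (gen_languages entries)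

-- ===== LEMMAS AND PROOFS =====

theorem mk_single_eq_backslash (c : Char) : (String.ofList [c] == "\\") = (c == '\\') := by
  by_cases hc : c = '\\'
  · subst hc; rfl
  · have h1 : String.ofList [c] ≠ "\\" := fun h =>
      hc (by have := congrArg String.toList h; simpa using this)
    simp [h1, hc]

theorem join_cons_cons' (sep x y : String) (t : List String) :
    PySem.Str.join sep (x :: y :: t) = x ++ sep ++ PySem.Str.join sep (y :: t) := by
  simp [PySem.Str.join, PySem.Chars.join_cons_cons, String.append_assoc]

theorem join_singleton' (sep x : String) : PySem.Str.join sep [x] = x := by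
  simp [PySem.Str.join, PySem.Chars.join_singleton]

theorem join_empty_cons (x : String) (t : List String) :
    PySem.Str.join "" (x :: t) = x ++ PySem.Str.join "" t := by
  cases t with
  | nil => simp [PySem.Str.join, PySem.Chars.join_nil]
  | cons y t' => rw [join_cons_cons']; simp

-- A's per-char decision: escape '&' exactly when the previous char is not '\'
def fA (p c : Char) : String := if c == '&' && p != '\\' then "\\&" else String.ofList [c]

theorem escA_fold_eq (l : List Char) (acc : List String) (p : Char) (pstr : String)
    (h : (pstr == "\\") = (p == '\\')) :
    (l.foldl
      (fun (st : List String × String) ch =>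
        if ch == '&' && st.2 != "\\" then (st.1 ++ ["\\&"], String.ofList [ch])
        else (st.1 ++ [String.ofList [ch]], String.ofList [ch]))
      (acc, pstr)).1
    = acc ++ ((p :: l).zip l).map (fun pc => fA pc.1 pc.2) := by
  induction l generalizing acc p pstr with
  | nil => simp
  | cons c cs ih =>
    have hb : (pstr != "\\") = (p != '\\') := by simp [bne, h]
    simp only [List.foldl_cons, List.zip_cons_cons, List.map_cons, hb]
    by_cases hcond : (c == '&' && p != '\\') = true
    · have hfa : fA p c = "\\&" := by simp only [fA, if_pos hcond]
      rw [if_pos hcond, ih _ _ _ (mk_single_eq_backslash c), hfa]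
      simp
    · have hfa : fA p c = String.ofList [c] := by simp only [fA, if_neg hcond]
      rw [if_neg hcond, ih _ _ _ (mk_single_eq_backslash c), hfa]
      simp

-- joining A's per-char output equals joining B's tokens, for any previous char p that is
-- either not '\' or not followed by '&' at the head
theorem tok_eq (l : List Char) :
    ∀ p : Char, (p = '\\' → l.head? ≠ some '&') →
    PySem.Str.join "" (((p :: l).zip l).map (fun pc => fA pc.1 pc.2))
      = PySem.Str.join "" (escBTok l) := by
  induction l using escBTok.induct with
  | case1 rest ih =>
    intro p _
    simp only [List.zip_cons_cons, List.map_cons, escBTok]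
    rw [join_empty_cons, join_empty_cons, join_empty_cons,
        ih '&' (by intro h; cases h)]
    have hx : fA p '\\' = "\\" := by simp [fA]
    have hy : fA '\\' '&' = "&" := by simp [fA]
    rw [hx, hy, ← String.append_assoc]
    rfl
  | case2 rest ih =>
    intro p hp
    have hpb : p ≠ '\\' := fun h => (hp h) rfl
    simp only [List.zip_cons_cons, List.map_cons, escBTok]
    rw [join_empty_cons, join_empty_cons, ih '&' (by intro h; cases h)]
    have hx : fA p '&' = "\\&" := by simp [fA, hpb]
    rw [hx]
  | case3 c rest h1 h2 ih =>
    intro p _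
    have hc : c ≠ '&' := fun h => h2 h
    simp only [List.zip_cons_cons, List.map_cons, escBTok]
    rw [join_empty_cons, join_empty_cons]
    have hcd : (c = '\\' → (rest.head? ≠ some '&')) := by
      intro hce hh
      cases rest with
      | nil => simp at hh
      | cons d r =>
        simp at hh
        exact h1 r hce (by rw [hh])
    rw [ih c hcd]
    have hx : fA p c = String.ofList [c] := by simp [fA, hc]
    rw [hx]
  | case4 => intro p _; rfl

theorem esc_eq (v : String) : escA v = escB v := by
  unfold escA escB
  dsimp only
  rw [escA_fold_eq _ _ ' ' _ rfl]
  rw [List.nil_append, tok_eq _ ' ' (by intro h; cases h)]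

theorem foldl_append_map {α : Type} (F : α → String) (l : List α) (acc : List String) :
    l.foldl (fun a x => a ++ [F x]) acc = acc ++ l.map F := by
  induction l generalizing acc with
  | nil => simp
  | cons x xs ih => simp [List.foldl, ih]

theorem join_suffix_eq (l : List (List (String × String))) (k n : Int)
    (h : k + l.length = n) :
    PySem.Str.join "\n" ((PySem.List.enumerate l k).map
      (fun p => lineOfB p.2 ++ (if p.1 < n - 1 then " \\\\" else "")))
    = PySem.Str.join " \\\\\n" (l.map lineOfB) := by
  induction l generalizing k with
  | nil => simp [PySem.List.enumerate_nil, PySem.Str.join, PySem.Chars.join_nil]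
  | cons a rest ih =>
    rw [PySem.List.enumerate_cons]
    cases rest with
    | nil =>
      have hk : ¬ (k < n - 1) := by simp at h; omega
      simp only [PySem.List.enumerate_nil, List.map_cons, List.map_nil, if_neg hk]
      rw [join_singleton', join_singleton']
      simp
    | cons b rest' =>
      have hk : k < n - 1 := by simp at h; omega
      simp only [List.map_cons, if_pos hk]
      rw [PySem.List.enumerate_cons, List.map_cons]
      rw [join_cons_cons']
      have := ih (k + 1) (by simp at h ⊢; omega)
      rw [PySem.List.enumerate_cons, List.map_cons] at this
      rw [this, join_cons_cons']
      simp [String.append_assoc]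

-- ===== VERDICT (by name: the statement is the Claim_ definition above) =====
theorem gen_languages_spec : Claim_equal_gen_languages := by
  intro entries _
  unfold Spec_gen_languages gen_languages gen_languages_alt
  dsimp only
  rw [foldl_append_map (F := fun p : Int × List (String × String) =>
        "     \\textbf{" ++ escA ((PySem.Dict.mk p.2).getD "language" "") ++ "}{: "
        ++ escA ((PySem.Dict.mk p.2).getD "fluency" "") ++ "}"
        ++ (if p.1 < (entries.length : Int) - 1 then " \\\\" else ""))]
  rw [List.map_congr_left (g := fun p : Int × List (String × String) =>
        lineOfB p.2 ++ (if p.1 < (entries.length : Int) - 1 then " \\\\" else ""))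
      (fun p _ => by rw [esc_eq, esc_eq]; rfl)]
  rw [List.nil_append, join_suffix_eq entries 0 entries.length (by simp)]
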